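-- pv_equiv track=rewrite | github.com/dleemiller/CnakeCharmer | cnake_data/unpaired/compound_ngram_merge.py | apply_compound_dictionary
-- ===== SOURCE A (Python) =====
-- def apply_compound_dictionary(tokens, compound_dictionary):
--     """Merge 3-gram then 2-gram token patterns using a replacement dictionary.
--
--     Args:
--         tokens: list of ``word/tag`` strings.
--         compound_dictionary: mapping from tuple(words...) -> "merged/tag".
--     """
--     words = [t.split("/", 1)[0] for t in tokens]
--     merged = list(tokens)
--
--     grams = {
--         3: {k: v for k, v in compound_dictionary.items() if len(k) == 3},
--         2: {k: v for k, v in compound_dictionary.items() if len(k) == 2},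
--     }
--
--     for n in (3, 2):
--         to_remove = set()
--         gram_dict = grams[n]
--
--         for key, replacement in gram_dict.items():
--             start = 0
--             while start <= len(words) - n:
--                 if tuple(words[start : start + n]) == key:
--                     new_word, new_tag = replacement.split("/", 1)
--                     words[start] = new_word
--                     merged[start] = f"{new_word}/{new_tag}"
--                     for idx in range(start + 1, start + n):
--                         to_remove.add(idx)
--                     start += n
--                 else:
--                     start += 1
--
--         if to_remove:
--             merged = [t for i, t in enumerate(merged) if i not in to_remove]
--             words = [t.split("/", 1)[0] for t in merged]
--
--     return merged
-- ===== SOURCE B (Python) =====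
-- def apply_compound_dictionary(tokens, compound_dictionary):
--     """Merge 3-gram then 2-gram token patterns using a replacement dictionary.
--
--     Different algorithm: instead of scanning the whole token list once per
--     dictionary key, each pass builds a hash index mapping every n-gram window
--     to its set of start positions; each key is then processed by looking up
--     (and re-verifying) just its candidate positions, and a replacement updates
--     only the <= n windows it touches, so windows created by earlier keys are
--     still found.  Mutation/removal bookkeeping mirrors the original.
--     """
--     words = [t.split("/", 1)[0] for t in tokens]
--     merged = list(tokens)
--
--     for n in (3, 2):
--         keys = [(tuple(k), v) for k, v in compound_dictionary.items()
--                 if len(k) == n]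
--         N = len(words)
--
--         index = {}
--         for q in range(N - n + 1):
--             index.setdefault(tuple(words[q:q + n]), set()).add(q)
--
--         removed = set()
--         for key, replacement in keys:
--             cursor = 0
--             for p in sorted(index.get(key, ())):
--                 if p < cursor or tuple(words[p:p + n]) != key:
--                     continue
--                 new_word, new_tag = replacement.split("/", 1)
--                 words[p] = new_word
--                 merged[p] = f"{new_word}/{new_tag}"
--                 for q in range(max(0, p - n + 1), p + 1):
--                     index.setdefault(tuple(words[q:q + n]), set()).add(q)
--                 removed.update(range(p + 1, p + n))
--                 cursor = p + n
--
--         if removed: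
--             merged = [t for i, t in enumerate(merged) if i not in removed]
--             words = [t.split("/", 1)[0] for t in merged]
--
--     return merged
-- ===== Notes on version B (the rewrite author's own statement) =====
-- stated objective: alternative
-- what changed: Each pass now builds a hash index from every n-gram window to its set of start positions and processes each dictionary key by sorted candidate lookup with re-verification, updating only the <= n windows a replacement touches, instead of A's full left-to-right scan of the token list for every key; it trades a per-pass index build for per-key scans, so it wins only when the dictionary has many keys.
-- outside the precondition, e.g. on apply_compound_dictionary(['a/N'], {('a', 'a'): 'x'}): A returns ['a/N'], B returns ['a/N']
import Mathlib
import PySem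

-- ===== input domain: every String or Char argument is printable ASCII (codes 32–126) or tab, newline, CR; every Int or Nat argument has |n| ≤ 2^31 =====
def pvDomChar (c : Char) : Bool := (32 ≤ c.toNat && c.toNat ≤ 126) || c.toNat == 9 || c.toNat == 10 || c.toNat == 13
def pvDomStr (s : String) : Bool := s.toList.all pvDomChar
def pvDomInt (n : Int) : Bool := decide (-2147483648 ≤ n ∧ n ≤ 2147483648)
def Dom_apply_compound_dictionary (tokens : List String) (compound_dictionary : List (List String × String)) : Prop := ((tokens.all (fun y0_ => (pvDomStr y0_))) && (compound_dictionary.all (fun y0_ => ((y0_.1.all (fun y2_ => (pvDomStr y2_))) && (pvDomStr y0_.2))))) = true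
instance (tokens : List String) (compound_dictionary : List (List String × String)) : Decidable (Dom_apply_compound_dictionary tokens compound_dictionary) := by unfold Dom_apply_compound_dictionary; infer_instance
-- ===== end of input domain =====

-- B replaces A's one-full-scan-per-key passes by a per-pass hash index from each n-gram
-- window to its start positions, processing every key via lookup + local index updates;
-- objective: alternative (a different algorithm, not measured faster).

-- ===== PORT A =====
-- t.split("/", 1)[0]  ("/" is never empty, so splitMax? is always `some`; [0] exists: split returns ≥ 1 piece)
def pvWord (t : String) : String :=
  ((PySem.Str.splitMax? t "/" 1).getD [t]).headD ""

-- new_word, new_tag = replacement.split("/", 1); a value without "/" makes Python raise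
-- ValueError here (1 piece cannot unpack into 2) — those inputs are outside Pre_; the
-- total port then yields ("", "")-style defaults via headD/getD.
def pvRepl (v : String) : String × String :=
  let ps := (PySem.Str.splitMax? v "/" 1).getD [v]
  (ps.headD "", (ps.drop 1).headD "")

-- tuple(words[p:p+n]) — the length-n window of words at p (both Pythons compute it)
def pvWin (words : List String) (p : Int) (n : Nat) : List String :=
  PySem.List.slice words (some p) (some (p + (n : Int)))

-- the `while start <= len(words) - n` loop of A, one key: words/merged mutated at index
-- `start`, removed indices accumulated in `rem`.  fuel = len(words)+1 bounds the loop
-- (start grows by ≥ 1 each iteration), making the recursion structural.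
def pvA_scan (key : List String) (repl : String) (n : Nat) :
    Nat → Nat → List String × List String × PySem.Set Int →
    List String × List String × PySem.Set Int
  | 0, _, st => st
  | fuel + 1, start, (words, merged, rem) =>
    if (start : Int) ≤ (words.length : Int) - (n : Int) then
      if pvWin words (start : Int) n == key then
        let wt := pvRepl repl
        let words' := PySem.List.pySetD words (start : Int) wt.1
        let merged' := PySem.List.pySetD merged (start : Int) (wt.1 ++ "/" ++ wt.2)
        let rem' := (PySem.List.pyRange ((start : Int) + 1) ((start : Int) + (n : Int)) 1).foldl
          PySem.Set.add rem
        pvA_scan key repl n fuel (start + n) (words', merged', rem')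
      else
        pvA_scan key repl n fuel (start + 1) (words, merged, rem)
    else (words, merged, rem)

-- one `for n in (3, 2)` iteration of A: all keys of gram_dict, then the
-- `if to_remove:` rebuild of merged and words
def pvA_pass (n : Nat) (gram : List (List String × String)) (words merged : List String) :
    List String × List String :=
  let st := gram.foldl
    (fun st kv => pvA_scan kv.1 kv.2 n (st.1.length + 1) 0 st)
    (words, merged, (PySem.Set.empty : PySem.Set Int))
  if st.2.2.isEmpty then (st.1, st.2.1)
  else
    let merged2 := ((PySem.List.enumerate st.2.1 0).filter
      (fun p => !(PySem.Set.contains st.2.2 p.1))).map (·.2)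
    (merged2.map pvWord, merged2)

def apply_compound_dictionary (tokens : List String) (compound_dictionary : List (List String × String)) : List String :=
  let words := tokens.map pvWord
  let merged := tokens
  -- a dict comprehension over a dict's (unique-keyed) items is exactly this filter
  let items := (PySem.Dict.ofList compound_dictionary).items
  let grams3 := items.filter (fun kv => kv.1.length == 3)
  let grams2 := items.filter (fun kv => kv.1.length == 2)
  let st3 := pvA_pass 3 grams3 words merged
  let st2 := pvA_pass 2 grams2 st3.1 st3.2
  st2.2

-- ===== PORT B =====
-- index.setdefault(t, set()).add(q): same mapping (only lookups are used on the index)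
def pvIdxAdd (idx : PySem.Dict (List String) (PySem.Set Int)) (t : List String) (q : Int) :
    PySem.Dict (List String) (PySem.Set Int) :=
  idx.insert t (PySem.Set.add (idx.getD t PySem.Set.empty) q)

-- the `for p in sorted(index.get(key, ())):` loop of Source B, one key: candidate positions
-- are skipped when already consumed (p < cursor) or when re-verification fails; a match
-- mutates words/merged at p, adds the ≤ n windows touching p to the index, and records
-- the removed indices.
def pvB_key (n : Nat) (key : List String) (repl : String) :
    List Int → Int →
    List String × List String × PySem.Dict (List String) (PySem.Set Int) × PySem.Set Int →
    List String × List String × PySem.Dict (List String) (PySem.Set Int) × PySem.Set Int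
  | [], _, st => st
  | p :: ps, cursor, (words, merged, idx, rem) =>
    if p < cursor || !(pvWin words p n == key) then
      pvB_key n key repl ps cursor (words, merged, idx, rem)
    else
      let wt := pvRepl repl
      let words' := PySem.List.pySetD words p wt.1
      let merged' := PySem.List.pySetD merged p (wt.1 ++ "/" ++ wt.2)
      let idx' := (PySem.List.pyRange (max 0 (p - (n : Int) + 1)) (p + 1) 1).foldl
        (fun ix q => pvIdxAdd ix (pvWin words' q n) q) idx
      let rem' := (PySem.List.pyRange (p + 1) (p + (n : Int)) 1).foldl PySem.Set.add rem
      pvB_key n key repl ps (p + (n : Int)) (words', merged', idx', rem')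

-- one pass of Source B: build the window index, process each key via lookups, then the
-- `if removed:` rebuild of merged and words
def pvB_pass (n : Nat) (items : List (List String × String)) (words merged : List String) :
    List String × List String :=
  let gram := items.filter (fun kv => kv.1.length == n)
  let idx0 := (PySem.List.pyRange 0 ((words.length : Int) - (n : Int) + 1) 1).foldl
    (fun ix q => pvIdxAdd ix (pvWin words q n) q) PySem.Dict.empty
  let st := gram.foldl
    (fun st kv => pvB_key n kv.1 kv.2
      (PySem.List.sorted (st.2.2.1.getD kv.1 PySem.Set.empty) (fun x => x) false) 0 st)
    (words, merged, idx0, (PySem.Set.empty : PySem.Set Int))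
  if st.2.2.2.isEmpty then (st.1, st.2.1)
  else
    let merged2 := ((PySem.List.enumerate st.2.1 0).filter
      (fun p => !(PySem.Set.contains st.2.2.2 p.1))).map (·.2)
    (merged2.map pvWord, merged2)

def apply_compound_dictionary_alt (tokens : List String) (compound_dictionary : List (List String × String)) : List String :=
  let words := tokens.map pvWord
  let items := (PySem.Dict.ofList compound_dictionary).items
  let s3 := pvB_pass 3 items words tokens
  let s2 := pvB_pass 2 items s3.1 s3.2
  s2.2

-- ===== PRECONDITION & SPEC =====
-- Pre_ excludes inputs on which Python A raises ValueError: a 2- or 3-gram entry whose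
-- replacement value lacks "/" raises when its pattern matches during the run; since
-- matching is input-dependent, Pre_ admits such an entry only when its key contains a
-- word that can never occur (neither an initial token word nor the head word of any
-- well-formed replacement value), so the entry can never match.  B raises there too.
def Pre_apply_compound_dictionary (tokens : List String) (compound_dictionary : List (List String × String)) : Prop :=
  ∀ kv ∈ compound_dictionary,
    (kv.1.length = 2 ∨ kv.1.length = 3) → PySem.Str.isIn "/" kv.2 = false →
      ∃ w ∈ kv.1,
        w ∉ tokens.map pvWord ++
          (compound_dictionary.filter
            (fun e => decide (e.1.length = 2 ∨ e.1.length = 3) && PySem.Str.isIn "/" e.2)).map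
            (fun e => pvWord e.2)
instance (tokens : List String) (compound_dictionary : List (List String × String)) : Decidable (Pre_apply_compound_dictionary tokens compound_dictionary) := by unfold Pre_apply_compound_dictionary; infer_instance

def pvWitness_apply_compound_dictionary : List String × (List (List String × String)) :=
  (["a/N", "b/V", "c/N"], [(["a", "b"], "ab/N"), (["x", "y", "z"], "xyz/V")])

def Spec_apply_compound_dictionary (tokens : List String) (compound_dictionary : List (List String × String)) (out : List String) : Prop := out = apply_compound_dictionary_alt tokens compound_dictionary
instance (tokens : List String) (compound_dictionary : List (List String × String)) (out : List String) : Decidable (Spec_apply_compound_dictionary tokens compound_dictionary out) := by unfold Spec_apply_compound_dictionary; infer_instance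

-- ===== CLAIM (what is proved, stated in full; the proofs are below) =====
def Claim_equal_apply_compound_dictionary : Prop := ∀ (tokens : List String) (compound_dictionary : List (List String × String)), Dom_apply_compound_dictionary tokens compound_dictionary → Pre_apply_compound_dictionary tokens compound_dictionary → Spec_apply_compound_dictionary tokens compound_dictionary (apply_compound_dictionary tokens compound_dictionary)

-- ===== LEMMAS AND PROOFS =====

-- membership in the index after one setdefault-add
theorem pv_mem_idxAdd (idx : PySem.Dict (List String) (PySem.Set Int))
    (t0 t : List String) (r q : Int) :
    q ∈ (pvIdxAdd idx t0 r).getD t PySem.Set.empty ↔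
      q ∈ idx.getD t PySem.Set.empty ∨ (q = r ∧ t0 = t) := by
  unfold pvIdxAdd
  rw [PySem.Dict.getD_insert]
  by_cases h : t = t0
  · subst h
    rw [if_pos rfl, PySem.Set.mem_add]
    simp
  · rw [if_neg h]
    constructor
    · exact Or.inl
    · rintro (hh | ⟨_, hh⟩)
      · exact hh
      · exact absurd hh.symm h

-- membership in the index after a fold of setdefault-adds keyed by a window function
theorem pv_mem_idx_fold (g : Int → List String) :
    ∀ (l : List Int) (idx : PySem.Dict (List String) (PySem.Set Int))
      (t : List String) (q : Int),
      q ∈ (l.foldl (fun ix r => pvIdxAdd ix (g r) r) idx).getD t PySem.Set.empty ↔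
        q ∈ idx.getD t PySem.Set.empty ∨ (q ∈ l ∧ g q = t) := by
  intro l
  induction l with
  | nil => intro idx t q; simp
  | cons r rs ih =>
    intro idx t q
    simp only [List.foldl_cons, ih, pv_mem_idxAdd, List.mem_cons]
    have hgr : (q = r ∧ g r = t) ↔ (q = r ∧ g q = t) := by
      constructor <;> rintro ⟨rfl, h⟩ <;> exact ⟨rfl, h⟩
    rw [hgr]
    tauto

-- a window not containing the set position is unchanged
theorem pv_win_set (words : List String) (v : String) (c q n : Nat)
    (h : c < q ∨ q + n ≤ c) :
    pvWin (words.set c v) (q : Int) n = pvWin words (q : Int) n := by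
  unfold pvWin
  rw [PySem.List.slice_natCast_add, PySem.List.slice_natCast_add]
  apply List.ext_getElem
  · simp
  · intro i h1 h2
    simp only [List.length_take, List.length_drop, List.length_set, lt_min_iff] at h1
    simp only [List.getElem_take, List.getElem_drop, List.getElem_set]
    rw [if_neg (by omega)]

-- Source B's loop skips a prefix of consumed / non-matching candidates
theorem pv_B_skip (n : Nat) (key : List String) (repl : String) :
    ∀ (pre rest : List Int) (cursor : Int)
      (words merged : List String) (idx : PySem.Dict (List String) (PySem.Set Int))
      (rem : PySem.Set Int),
      (∀ p ∈ pre, p < cursor ∨ ¬ (pvWin words p n = key)) →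
      pvB_key n key repl (pre ++ rest) cursor (words, merged, idx, rem)
        = pvB_key n key repl rest cursor (words, merged, idx, rem) := by
  intro pre
  induction pre with
  | nil => intro rest cursor words merged idx rem _; rfl
  | cons p ps ih =>
    intro rest cursor words merged idx rem h
    have hp := h p (by simp)
    rw [List.cons_append, pvB_key, if_pos]
    · exact ih rest cursor words merged idx rem (fun r hr => h r (by simp [hr]))
    · rcases hp with hp | hp
      · simp [hp]
      · simp [hp]

-- split a sorted candidate list at (the first occurrence of) a member
theorem pv_sorted_split (L : List Int) (c : Int) (hs : L.Pairwise (· ≤ ·)) (hc : c ∈ L) :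
    ∃ pre post, L = pre ++ c :: post ∧ (∀ p ∈ pre, p < c) ∧ (∀ p ∈ post, c ≤ p) := by
  induction L with
  | nil => cases hc
  | cons x xs ih =>
    rcases List.pairwise_cons.mp hs with ⟨hx, hs'⟩
    by_cases hxc : x = c
    · subst hxc
      exact ⟨[], xs, rfl, by simp, hx⟩
    · rcases List.mem_cons.mp hc with h | h
      · exact absurd h.symm hxc
      · obtain ⟨pre, post, hL, hpre, hpost⟩ := ih hs' h
        refine ⟨x :: pre, post, by simp [hL], ?_, hpost⟩
        intro p hp
        rcases List.mem_cons.mp hp with rfl | hp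
        · have : p ≤ c := hx c h
          omega
        · exact hpre p hp

-- unfolding equations for the match branches
theorem pvA_scan_match (key : List String) (repl : String) (n : Nat) (fuel c : Nat)
    (words merged : List String) (rem : PySem.Set Int)
    (h1 : (c : Int) ≤ (words.length : Int) - (n : Int))
    (h2 : pvWin words (c : Int) n = key) :
    pvA_scan key repl n (fuel + 1) c (words, merged, rem)
      = pvA_scan key repl n fuel (c + n)
          (PySem.List.pySetD words (c : Int) (pvRepl repl).1,
           PySem.List.pySetD merged (c : Int) ((pvRepl repl).1 ++ "/" ++ (pvRepl repl).2),
           (PySem.List.pyRange ((c : Int) + 1) ((c : Int) + (n : Int)) 1).foldl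
             PySem.Set.add rem) := by
  rw [pvA_scan, if_pos h1, if_pos (by simp [h2])]

theorem pvA_scan_nomatch (key : List String) (repl : String) (n : Nat) (fuel c : Nat)
    (words merged : List String) (rem : PySem.Set Int)
    (h1 : (c : Int) ≤ (words.length : Int) - (n : Int))
    (h2 : ¬ pvWin words (c : Int) n = key) :
    pvA_scan key repl n (fuel + 1) c (words, merged, rem)
      = pvA_scan key repl n fuel (c + 1) (words, merged, rem) := by
  rw [pvA_scan, if_pos h1, if_neg (by simp [h2])]

theorem pvA_scan_stop (key : List String) (repl : String) (n : Nat) (fuel c : Nat)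
    (words merged : List String) (rem : PySem.Set Int)
    (h1 : ¬ (c : Int) ≤ (words.length : Int) - (n : Int)) :
    pvA_scan key repl n (fuel + 1) c (words, merged, rem) = (words, merged, rem) := by
  rw [pvA_scan, if_neg h1]

theorem pvB_key_match (n : Nat) (key : List String) (repl : String) (p : Int)
    (ps : List Int) (cursor : Int) (words merged : List String)
    (idx : PySem.Dict (List String) (PySem.Set Int)) (rem : PySem.Set Int)
    (h1 : ¬ p < cursor) (h2 : pvWin words p n = key) :
    pvB_key n key repl (p :: ps) cursor (words, merged, idx, rem)
      = pvB_key n key repl ps (p + (n : Int))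
          (PySem.List.pySetD words p (pvRepl repl).1,
           PySem.List.pySetD merged p ((pvRepl repl).1 ++ "/" ++ (pvRepl repl).2),
           (PySem.List.pyRange (max 0 (p - (n : Int) + 1)) (p + 1) 1).foldl
             (fun ix q => pvIdxAdd ix (pvWin (PySem.List.pySetD words p (pvRepl repl).1) q n) q)
             idx,
           (PySem.List.pyRange (p + 1) (p + (n : Int)) 1).foldl PySem.Set.add rem) := by
  rw [pvB_key, if_neg (by simp [h1, h2])]

-- THE KEY LEMMA
theorem pv_key_eq (n : Nat) (hn : 1 ≤ n) (key : List String) (repl : String) (N : Nat) :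
    ∀ (fuel c : Nat) (L : List Int) (cursor : Int)
      (words merged : List String) (idx : PySem.Dict (List String) (PySem.Set Int))
      (rem : PySem.Set Int),
      N - c < fuel →
      words.length = N → merged.length = N →
      L.Pairwise (· ≤ ·) →
      (∀ p ∈ L, 0 ≤ p ∧ p + n ≤ (N : Int)) →
      cursor ≤ (c : Int) →
      (∀ p ∈ L, cursor ≤ p → p < (c : Int) → ¬ (pvWin words p n = key)) →
      (∀ q : Nat, c ≤ q → (q : Int) + n ≤ (N : Int) → pvWin words (q : Int) n = key →
        (q : Int) ∈ L) →
      (∀ t q, q ∈ idx.getD t PySem.Set.empty → 0 ≤ q ∧ q + n ≤ (N : Int)) →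
      (∀ q : Nat, (q : Int) + n ≤ (N : Int) →
        (q : Int) ∈ idx.getD (pvWin words (q : Int) n) PySem.Set.empty) →
      ∃ idx',
        pvB_key n key repl L cursor (words, merged, idx, rem)
          = ((pvA_scan key repl n fuel c (words, merged, rem)).1,
             (pvA_scan key repl n fuel c (words, merged, rem)).2.1, idx',
             (pvA_scan key repl n fuel c (words, merged, rem)).2.2)
        ∧ (pvA_scan key repl n fuel c (words, merged, rem)).1.length = N
        ∧ (pvA_scan key repl n fuel c (words, merged, rem)).2.1.length = N
        ∧ (∀ t q, q ∈ idx'.getD t PySem.Set.empty → 0 ≤ q ∧ q + n ≤ (N : Int))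
        ∧ (∀ q : Nat, (q : Int) + n ≤ (N : Int) →
            (q : Int) ∈ idx'.getD
              (pvWin (pvA_scan key repl n fuel c (words, merged, rem)).1 (q : Int) n)
              PySem.Set.empty) := by
  intro fuel
  induction fuel with
  | zero => intro c L cursor words merged idx rem hfuel; omega
  | succ fuel ih =>
    intro c L cursor words merged idx rem hfuel hW hM hsort hbound hcur hskip hcomp hidxB hidxC
    by_cases hg : (c : Int) ≤ (words.length : Int) - (n : Int)
    · by_cases hmatch : pvWin words (c : Int) n = key
      · -- ===== match at c =====
        have hgN : (c : Int) ≤ (N : Int) - (n : Int) := by rw [hW] at hg; exact hg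
        have hcmem : (c : Int) ∈ L := hcomp c (le_refl c) (by omega) hmatch
        obtain ⟨pre, post, hLsplit, hpre, hpost⟩ := pv_sorted_split L c hsort hcmem
        -- B skips the consumed / non-matching prefix
        have hskip_pre : ∀ p ∈ pre, p < cursor ∨ ¬ (pvWin words p n = key) := by
          intro p hp
          by_cases hpc : cursor ≤ p
          · exact Or.inr (hskip p (by rw [hLsplit]; exact List.mem_append_left _ hp) hpc
              (hpre p hp))
          · exact Or.inl (by omega)
        set wt := pvRepl repl with hwt
        set words' := PySem.List.pySetD words (c : Int) wt.1 with hwords'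
        set merged' := PySem.List.pySetD merged (c : Int) (wt.1 ++ "/" ++ wt.2) with hmerged'
        have hws : words' = words.set c wt.1 := by
          rw [hwords']; simp
        have hms : merged' = merged.set c (wt.1 ++ "/" ++ wt.2) := by
          rw [hmerged']; simp
        set idx2 := (PySem.List.pyRange (max 0 ((c : Int) - (n : Int) + 1)) ((c : Int) + 1) 1).foldl
          (fun ix q => pvIdxAdd ix (pvWin words' q n) q) idx with hidx2
        set rem' := (PySem.List.pyRange ((c : Int) + 1) ((c : Int) + (n : Int)) 1).foldl
          PySem.Set.add rem with hrem'
        have hW' : words'.length = N := by rw [hws]; simpa using hW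
        have hM' : merged'.length = N := by rw [hms]; simpa using hM
        -- stability of windows not containing c
        have hstab : ∀ q : Nat, (c < q ∨ q + n ≤ c) →
            pvWin words' (q : Int) n = pvWin words (q : Int) n := by
          intro q hq
          rw [hws]
          exact pv_win_set words wt.1 c q n hq
        have hidxB2 : ∀ t q, q ∈ idx2.getD t PySem.Set.empty → 0 ≤ q ∧ q + n ≤ (N : Int) := by
          intro t q hq
          rw [hidx2, pv_mem_idx_fold (fun r => pvWin words' r n)] at hq
          rcases hq with hq | ⟨hq, _⟩
          · exact hidxB t q hq
          · have := PySem.List.mem_pyRange_one.mp hq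
            omega
        have hidxC2 : ∀ q : Nat, (q : Int) + n ≤ (N : Int) →
            (q : Int) ∈ idx2.getD (pvWin words' (q : Int) n) PySem.Set.empty := by
          intro q hq
          rw [hidx2, pv_mem_idx_fold (fun r => pvWin words' r n)]
          by_cases hq2 : (c : Int) - (n : Int) + 1 ≤ (q : Int) ∧ (q : Int) ≤ (c : Int)
          · exact Or.inr ⟨PySem.List.mem_pyRange_one.mpr ⟨by omega, by omega⟩, rfl⟩
          · have hout : c < q ∨ q + n ≤ c := by omega
            rw [hstab q hout]
            exact Or.inl (hidxC q hq)
        obtain ⟨idx', heq, hA1, hA2, hB', hC'⟩ := ih (c + n) post ((c : Int) + (n : Int))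
          words' merged' idx2 rem'
          (by omega) hW' hM'
          (List.Pairwise.sublist
            ((List.sublist_cons_self _ _).trans
              (by rw [hLsplit]; exact List.sublist_append_right _ _)) hsort)
          (fun p hp => hbound p (by rw [hLsplit]; exact List.mem_append_right _ (List.mem_cons_of_mem _ hp)))
          (by push_cast; omega)
          (fun p _ h1 h2 => absurd (lt_of_le_of_lt h1 h2) (by push_cast; omega))
          (by
            intro q hq1 hq2 hq3
            have hcq : c < q := by omega
            rw [hstab q (Or.inl hcq)] at hq3
            have hmem := hcomp q (by omega) hq2 hq3
            rw [hLsplit] at hmem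
            rcases List.mem_append.mp hmem with hmem | hmem
            · exact absurd (hpre _ hmem) (by omega)
            · rcases List.mem_cons.mp hmem with hmem | hmem
              · exact absurd hmem (by omega)
              · exact hmem)
          hidxB2 hidxC2
        refine ⟨idx', ?_, ?_, ?_, hB', ?_⟩
        · rw [hLsplit, pv_B_skip n key repl pre _ cursor words merged idx rem hskip_pre,
              pvB_key_match n key repl (c : Int) post cursor words merged idx rem
                (by omega) hmatch,
              pvA_scan_match key repl n fuel c words merged rem hg hmatch]
          exact heq
        · rw [pvA_scan_match key repl n fuel c words merged rem hg hmatch]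
          exact hA1
        · rw [pvA_scan_match key repl n fuel c words merged rem hg hmatch]
          exact hA2
        · rw [pvA_scan_match key repl n fuel c words merged rem hg hmatch]
          exact hC'
      · -- ===== no match at c =====
        have hgN : (c : Int) ≤ (N : Int) - (n : Int) := by rw [hW] at hg; exact hg
        obtain ⟨idx', heq, hA1, hA2, hB', hC'⟩ := ih (c + 1) L cursor words merged idx rem
          (by omega) hW hM hsort hbound (by push_cast; omega)
          (by
            intro p hp h1 h2
            by_cases hpc : p < (c : Int)
            · exact hskip p hp h1 hpc
            · have : p = (c : Int) := by push_cast at h2; omega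
              rw [this]; exact hmatch)
          (fun q h1 h2 h3 => hcomp q (by omega) h2 h3)
          hidxB hidxC
        rw [pvA_scan_nomatch key repl n fuel c words merged rem hg hmatch]
        exact ⟨idx', heq, hA1, hA2, hB', hC'⟩
    · -- ===== loop exit =====
      have hall : ∀ p ∈ L, p < cursor ∨ ¬ (pvWin words p n = key) := by
        intro p hp
        by_cases hpc : cursor ≤ p
        · refine Or.inr (hskip p hp hpc ?_)
          have hb := hbound p hp
          rw [hW] at hg
          omega
        · exact Or.inl (by omega)
      have hB0 := pv_B_skip n key repl L [] cursor words merged idx rem hall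
      rw [List.append_nil] at hB0
      rw [pvA_scan_stop key repl n fuel c words merged rem hg, hB0, pvB_key]
      exact ⟨idx, rfl, hW, hM, hidxB, hidxC⟩

-- fold over the keys of one pass
theorem pv_fold_eq (n : Nat) (hn : 1 ≤ n) (N : Nat) :
    ∀ (gram : List (List String × String)) (words merged : List String)
      (idx : PySem.Dict (List String) (PySem.Set Int)) (rem : PySem.Set Int),
      words.length = N → merged.length = N →
      (∀ t q, q ∈ idx.getD t PySem.Set.empty → 0 ≤ q ∧ q + n ≤ (N : Int)) →
      (∀ q : Nat, (q : Int) + n ≤ (N : Int) →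
        (q : Int) ∈ idx.getD (pvWin words (q : Int) n) PySem.Set.empty) →
      ∃ idx',
        gram.foldl
          (fun st kv => pvB_key n kv.1 kv.2
            (PySem.List.sorted (st.2.2.1.getD kv.1 PySem.Set.empty) (fun x => x) false) 0 st)
          (words, merged, idx, rem)
        = ((gram.foldl (fun st kv => pvA_scan kv.1 kv.2 n (st.1.length + 1) 0 st)
              (words, merged, rem)).1,
           (gram.foldl (fun st kv => pvA_scan kv.1 kv.2 n (st.1.length + 1) 0 st)
              (words, merged, rem)).2.1, idx',
           (gram.foldl (fun st kv => pvA_scan kv.1 kv.2 n (st.1.length + 1) 0 st)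
              (words, merged, rem)).2.2)
        ∧ (gram.foldl (fun st kv => pvA_scan kv.1 kv.2 n (st.1.length + 1) 0 st)
              (words, merged, rem)).1.length = N
        ∧ (gram.foldl (fun st kv => pvA_scan kv.1 kv.2 n (st.1.length + 1) 0 st)
              (words, merged, rem)).2.1.length = N := by
  intro gram
  induction gram with
  | nil =>
    intro words merged idx rem hW hM _ _
    exact ⟨idx, rfl, hW, hM⟩
  | cons kv gs ih =>
    intro words merged idx rem hW hM hidxB hidxC
    simp only [List.foldl_cons]
    set L := PySem.List.sorted (idx.getD kv.1 PySem.Set.empty) (fun x => x) false with hL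
    have hmemL : ∀ p : Int, p ∈ L ↔ p ∈ idx.getD kv.1 PySem.Set.empty := by
      intro p; rw [hL, PySem.List.mem_sorted]
    obtain ⟨idx1, heq, h1, h2, hB1, hC1⟩ := pv_key_eq n hn kv.1 kv.2 N (words.length + 1)
      0 L 0 words merged idx rem
      (by omega) hW hM
      (by
        have := PySem.List.sorted_pairwise (idx.getD kv.1 PySem.Set.empty) (fun x => x)
        simpa [hL] using this)
      (fun p hp => hidxB kv.1 p ((hmemL p).mp hp))
      (by omega)
      (fun p _ h1 h2 => absurd (lt_of_le_of_lt h1 h2) (by omega))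
      (by
        intro q _ hq2 hq3
        rw [hmemL]
        have := hidxC q hq2
        rwa [hq3] at this)
      hidxB hidxC
    rw [heq]
    obtain ⟨idx', heq', h1', h2'⟩ := ih _ _ idx1 _ h1 h2 hB1 hC1
    refine ⟨idx', ?_, ?_, ?_⟩
    · rw [heq']
    · simpa using h1'
    · simpa using h2'

-- one pass of A = one pass of B (and the pass keeps words/merged the same length)
theorem pv_pass_eq (n : Nat) (hn : 1 ≤ n) (items : List (List String × String))
    (words merged : List String) (hlen : words.length = merged.length) :
    pvA_pass n (items.filter (fun kv => kv.1.length == n)) words merged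
      = pvB_pass n items words merged
    ∧ (pvB_pass n items words merged).1.length = (pvB_pass n items words merged).2.length := by
  set N := words.length with hN
  set idx0 := (PySem.List.pyRange 0 ((words.length : Int) - (n : Int) + 1) 1).foldl
    (fun ix q => pvIdxAdd ix (pvWin words q n) q) PySem.Dict.empty with hidx0
  have hB0 : ∀ t q, q ∈ idx0.getD t PySem.Set.empty → 0 ≤ q ∧ q + n ≤ (N : Int) := by
    intro t q hq
    rw [hidx0, pv_mem_idx_fold (fun r => pvWin words r n)] at hq
    rcases hq with hq | ⟨hq, _⟩
    · rw [PySem.Dict.getD_empty] at hq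
      cases hq
    · have := PySem.List.mem_pyRange_one.mp hq
      omega
  have hC0 : ∀ q : Nat, (q : Int) + n ≤ (N : Int) →
      (q : Int) ∈ idx0.getD (pvWin words (q : Int) n) PySem.Set.empty := by
    intro q hq
    rw [hidx0, pv_mem_idx_fold (fun r => pvWin words r n)]
    exact Or.inr ⟨PySem.List.mem_pyRange_one.mpr ⟨by omega, by omega⟩, rfl⟩
  obtain ⟨idx', heq, h1, h2⟩ := pv_fold_eq n hn N (items.filter (fun kv => kv.1.length == n))
    words merged idx0 PySem.Set.empty rfl hlen.symm hB0 hC0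
  simp only [pvA_pass, pvB_pass, ← hidx0, heq]
  constructor
  · simp
  · split_ifs with hre
    · exact h1.trans h2.symm
    · simp

-- the two ports agree on every input (the Pre_/Dom_ hypotheses are not needed for the
-- return-value equality; Pre_ is there to exclude the inputs where the Pythons raise)
theorem pv_ports_agree :
    ∀ (tokens : List String) (compound_dictionary : List (List String × String)),
      apply_compound_dictionary tokens compound_dictionary
        = apply_compound_dictionary_alt tokens compound_dictionary := by
  intro tokens cd
  unfold apply_compound_dictionary apply_compound_dictionary_alt
  have h3 := pv_pass_eq 3 (by omega) (PySem.Dict.ofList cd).items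
    (tokens.map pvWord) tokens (by simp)
  have h2 := pv_pass_eq 2 (by omega) (PySem.Dict.ofList cd).items
    (pvB_pass 3 (PySem.Dict.ofList cd).items (tokens.map pvWord) tokens).1
    (pvB_pass 3 (PySem.Dict.ofList cd).items (tokens.map pvWord) tokens).2 h3.2
  simp only [h3.1, h2.1]

-- ===== VERDICT (by name: the statement is the Claim_ definition above) =====
theorem apply_compound_dictionary_spec : Claim_equal_apply_compound_dictionary := by
  intro tokens cd _ _
  show apply_compound_dictionary tokens cd = apply_compound_dictionary_alt tokens cd
  exact pv_ports_agree tokens cd
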